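-- pv_equiv track=rewrite | github.com/JyyHuang/CIS1051 | Hawaiian/hawaiianwords.py | pronounce
-- ===== SOURCE A (Python) =====
-- wdict = {
--     "w" : ["w","v"]
-- }
--
-- voweldict = {
--     "a" : "ah-",
--     "e" : "eh-",
--     "i" : "ee-",
--     "o" : "oh-",
--     "u" : "oo-"
-- }
--
-- consonantdict = {
--     "p" : "p",
--     "k" : "k",
--     "h" : "h",
--     "l" : "l",
--     "m" : "m",
--     "n" : "n",
--     " " : " ",
--     "'" : "'"
-- }
--
-- groupvoweldict = {
--     "ai" : "eye-",
--     "ae" : "eye-",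
--     "ao" : "ow-",
--     "au" : "ow-",
--     "ei" : "ay-",
--     "eu" : "eh-oo-",
--     "iu" : "ew-",
--     "oi" : "oyo-",
--     "ou" : "ow-",
--     "ui" : "ooey-"
-- }
--
-- def pronounce(string):
--     result = ""
--     index = 0
--     while index < len(string):
--
--         char = string[index].lower()
--
--         if char in consonantdict:
--             result += consonantdict[char]
--
--         elif char in wdict:
--             if char == "w" and string[index - 1] == "i" or string[index - 1] == "e":
--                 result += wdict[char][1]
--             else:
--                 result += wdict[char][0]
--
--         elif char in voweldict:
--             if index != len(string) - 1 and char + string[index + 1] in groupvoweldict:     # looks at the char and the next char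
--                 result += groupvoweldict[char + string[index + 1]]
--                 index += 1         # skips a char
--             else:
--                 result += voweldict[char]
--
--         index += 1
--     return result.rstrip("-").capitalize()
-- ===== SOURCE B (Python) =====
-- wdict = {
--     "w" : ["w","v"]
-- }
--
-- voweldict = {
--     "a" : "ah-",
--     "e" : "eh-",
--     "i" : "ee-",
--     "o" : "oh-",
--     "u" : "oo-"
-- }
--
-- consonantdict = {
--     "p" : "p",
--     "k" : "k",
--     "h" : "h",
--     "l" : "l",
--     "m" : "m",
--     "n" : "n",
--     " " : " ",
--     "'" : "'"
-- }
--
-- groupvoweldict = {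
--     "ai" : "eye-",
--     "ae" : "eye-",
--     "ao" : "ow-",
--     "au" : "ow-",
--     "ei" : "ay-",
--     "eu" : "eh-oo-",
--     "iu" : "ew-",
--     "oi" : "oyo-",
--     "ou" : "ow-",
--     "ui" : "ooey-"
-- }
--
-- def _tokenize(s):
--     # One pass: cut the word into self-contained tokens.
--     tokens = []
--     i, n = 0, len(s)
--     while i < n:
--         c = s[i].lower()
--         if c in voweldict and i != n - 1 and c + s[i + 1] in groupvoweldict:
--             tokens.append(("pair", c + s[i + 1]))
--             i += 2
--         elif c == "w":
--             tokens.append(("w", s[i - 1]))  # tag with the preceding raw char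
--             i += 1
--         else:
--             tokens.append(("one", c))
--             i += 1
--     return tokens
--
-- def _translate(token):
--     kind, v = token
--     if kind == "pair":
--         return groupvoweldict[v]
--     if kind == "w":
--         return wdict["w"][1] if v in ("i", "e") else wdict["w"][0]
--     if v in consonantdict:
--         return consonantdict[v]
--     if v in voweldict:
--         return voweldict[v]
--     return ""
--
-- def pronounce(string):
--     return "".join(map(_translate, _tokenize(string))).rstrip("-").capitalize()
-- ===== Notes on version B (the rewrite author's own statement) =====
-- stated objective: faster
-- what changed: B splits A's single interleaved while-loop into a tokenizer pass (vowel-pair / tagged-w / single-char tokens) and a separate translation pass mapped over the token list and joined with str.join, instead of growing the result string by repeated += inside the scan.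
import Mathlib
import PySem

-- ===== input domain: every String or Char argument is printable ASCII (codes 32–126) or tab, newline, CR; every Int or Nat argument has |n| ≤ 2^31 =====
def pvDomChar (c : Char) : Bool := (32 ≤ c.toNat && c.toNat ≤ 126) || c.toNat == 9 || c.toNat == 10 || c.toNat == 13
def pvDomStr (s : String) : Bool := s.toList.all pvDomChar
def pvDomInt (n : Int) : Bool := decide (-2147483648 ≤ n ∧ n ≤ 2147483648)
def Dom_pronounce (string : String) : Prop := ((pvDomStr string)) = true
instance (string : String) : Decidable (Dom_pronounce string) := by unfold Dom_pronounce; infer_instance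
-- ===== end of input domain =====

-- B replaces A's single interleaved scan-and-append loop by a tokenizer pass followed by a
-- separate token-translation pass joined at the end (objective: faster — a timing run measured
-- B ≥ 1.5× faster at the largest size; A grows its result by repeated string concatenation).

-- Shared module constants (the Python dicts, shared by A and B), as literal lookup chains.
def consonantDict (c : Char) : Option (List Char) :=
  if c = 'p' then some ['p'] else if c = 'k' then some ['k'] else if c = 'h' then some ['h']
  else if c = 'l' then some ['l'] else if c = 'm' then some ['m'] else if c = 'n' then some ['n']
  else if c = ' ' then some [' '] else if c = '\'' then some ['\''] else none

def vowelDict (c : Char) : Option (List Char) :=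
  if c = 'a' then some ['a','h','-'] else if c = 'e' then some ['e','h','-']
  else if c = 'i' then some ['e','e','-'] else if c = 'o' then some ['o','h','-']
  else if c = 'u' then some ['o','o','-'] else none

def groupVowelDict (a b : Char) : Option (List Char) :=
  if a = 'a' ∧ b = 'i' then some ['e','y','e','-'] else if a = 'a' ∧ b = 'e' then some ['e','y','e','-']
  else if a = 'a' ∧ b = 'o' then some ['o','w','-'] else if a = 'a' ∧ b = 'u' then some ['o','w','-']
  else if a = 'e' ∧ b = 'i' then some ['a','y','-'] else if a = 'e' ∧ b = 'u' then some ['e','h','-','o','o','-']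
  else if a = 'i' ∧ b = 'u' then some ['e','w','-'] else if a = 'o' ∧ b = 'i' then some ['o','y','o','-']
  else if a = 'o' ∧ b = 'u' then some ['o','w','-'] else if a = 'u' ∧ b = 'i' then some ['o','o','e','y','-']
  else none

-- port of str.rstrip("-") (exact: drop trailing '-' characters)
def rstripDash (cs : List Char) : List Char := (cs.reverse.dropWhile (· == '-')).reverse
-- port of str.capitalize() (exact on the ASCII domain, where titlecase = uppercase)
def pyCapitalize (cs : List Char) : List Char :=
  match cs with
  | [] => []
  | c :: r => PySem.Chars.upperChar c :: r.map PySem.Chars.lowerChar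

-- ===== PORT A =====
-- literal port of A's while-loop: index cursor, result accumulator, same branch order
def pronounceGo (cs : List Char) (index : Nat) (result : List Char) : List Char :=
  if h : index < cs.length then
    let char := PySem.Chars.lowerChar cs[index]
    match consonantDict char with
    | some t => pronounceGo cs (index + 1) (result ++ t)
    | none =>
      if char = 'w' then
        -- string[index - 1]: Python negative-index wraparound at index = 0; always in range (cs ≠ [])
        let prev := (PySem.List.pyGet? cs ((index : Int) - 1)).getD ' '
        if (char = 'w' ∧ prev = 'i') ∨ prev = 'e' then
          pronounceGo cs (index + 1) (result ++ ['v'])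
        else
          pronounceGo cs (index + 1) (result ++ ['w'])
      else
        match vowelDict char with
        | some v =>
          if index ≠ cs.length - 1 then
            match groupVowelDict char (cs.getD (index + 1) ' ') with  -- index+1 < length here
            | some g => pronounceGo cs (index + 2) (result ++ g)      -- index += 1 twice
            | none => pronounceGo cs (index + 1) (result ++ v)
          else pronounceGo cs (index + 1) (result ++ v)
        | none => pronounceGo cs (index + 1) result
  else result
termination_by cs.length - index

def pronounce (string : String) : String :=
  String.ofList (pyCapitalize (rstripDash (pronounceGo string.toList 0 [])))

-- ===== PORT B =====
inductive PToken where
  | pair : Char → Char → PToken   -- lowered vowel + raw next char, a groupvoweldict key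
  | wtok : Char → PToken          -- a 'w', tagged with the preceding raw char
  | one  : Char → PToken          -- any other single (lowered) char
deriving DecidableEq, Repr

-- pass 1 (Source B _tokenize): cut the word into self-contained tokens
def pvTokenize (cs : List Char) (i : Nat) : List PToken :=
  if h : i < cs.length then
    let c := PySem.Chars.lowerChar cs[i]
    if (vowelDict c).isSome ∧ i ≠ cs.length - 1 ∧ (groupVowelDict c (cs.getD (i + 1) ' ')).isSome then
      PToken.pair c (cs.getD (i + 1) ' ') :: pvTokenize cs (i + 2)
    else if c = 'w' then
      PToken.wtok ((PySem.List.pyGet? cs ((i : Int) - 1)).getD ' ') :: pvTokenize cs (i + 1)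
    else
      PToken.one c :: pvTokenize cs (i + 1)
  else []
termination_by cs.length - i

-- pass 2 (Source B _translate): one token → its phonetic piece
def pvTranslate (t : PToken) : List Char :=
  match t with
  | .pair a b => (groupVowelDict a b).getD []
  | .wtok p => if p = 'i' ∨ p = 'e' then ['v'] else ['w']
  | .one c =>
    match consonantDict c with
    | some s => s
    | none => (vowelDict c).getD []

def pronounce_alt (string : String) : String :=
  String.ofList (pyCapitalize (rstripDash ((pvTokenize string.toList 0).flatMap pvTranslate)))

-- ===== PRECONDITION & SPEC =====
def Spec_pronounce (string : String) (out : String) : Prop := out = pronounce_alt string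
instance (string : String) (out : String) : Decidable (Spec_pronounce string out) := by unfold Spec_pronounce; infer_instance

-- ===== CLAIM (what is proved, stated in full; the proofs are below) =====
def Claim_equal_pronounce : Prop := ∀ (string : String), Dom_pronounce string → Spec_pronounce string (pronounce string)

-- ===== LEMMAS AND PROOFS =====

lemma consonant_not_vowel {c : Char} {t : List Char} (h : consonantDict c = some t) :
    vowelDict c = none ∧ c ≠ 'w' := by
  unfold consonantDict at h
  split_ifs at h with h1 h2 h3 h4 h5 h6 h7 h8 <;> subst_vars <;> exact ⟨rfl, by decide⟩

lemma vowelDict_w : vowelDict 'w' = none := by decide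

lemma consonantDict_w : consonantDict 'w' = none := by decide

lemma pronounceGo_eq (cs : List Char) (i : Nat) (result : List Char) :
    pronounceGo cs i result = result ++ (pvTokenize cs i).flatMap pvTranslate := by
  induction i, result using pronounceGo.induct cs with
  | case1 i result h char t hcons ih =>
    have hc : consonantDict (PySem.Chars.lowerChar cs[i]) = some t := hcons
    obtain ⟨hv, hw⟩ := consonant_not_vowel hc
    rw [pronounceGo, pvTokenize]
    simp [dif_pos h, hc, hv, hw, ih, pvTranslate]
  | case2 i result h char hcons hw prev hc ih =>
    have hcn : consonantDict (PySem.Chars.lowerChar cs[i]) = none := hcons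
    have hwe : PySem.Chars.lowerChar cs[i] = 'w' := hw
    have hprev : (PySem.List.pyGet? cs ((i : Int) - 1)).getD ' ' = 'i' ∨
        (PySem.List.pyGet? cs ((i : Int) - 1)).getD ' ' = 'e' := by
      rcases hc with ⟨_, hp⟩ | hp
      · exact Or.inl hp
      · exact Or.inr hp
    rw [pronounceGo, pvTokenize]
    rcases hprev with hp | hp <;>
      simp [dif_pos h, hwe, hp, ih, pvTranslate, consonantDict_w, vowelDict_w]
  | case3 i result h char hcons hw prev hc ih =>
    have hcn : consonantDict (PySem.Chars.lowerChar cs[i]) = none := hcons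
    have hwe : PySem.Chars.lowerChar cs[i] = 'w' := hw
    have hni : (PySem.List.pyGet? cs ((i : Int) - 1)).getD ' ' ≠ 'i' := by
      intro hp; exact hc (Or.inl ⟨hw, hp⟩)
    have hne : (PySem.List.pyGet? cs ((i : Int) - 1)).getD ' ' ≠ 'e' := by
      intro hp; exact hc (Or.inr hp)
    rw [pronounceGo, pvTokenize]
    simp [dif_pos h, hwe, hni, hne, ih, pvTranslate, consonantDict_w, vowelDict_w]
  | case4 i result h char hcons hw v hvow hlast g hgrp ih =>
    have hcn : consonantDict (PySem.Chars.lowerChar cs[i]) = none := hcons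
    have hwn : PySem.Chars.lowerChar cs[i] ≠ 'w' := hw
    have hvo : vowelDict (PySem.Chars.lowerChar cs[i]) = some v := hvow
    have hla : i ≠ cs.length - 1 := hlast
    have hg : groupVowelDict (PySem.Chars.lowerChar cs[i]) (cs[i + 1]?.getD ' ') = some g := by
      simpa [List.getD_eq_getElem?_getD] using hgrp
    rw [pronounceGo, pvTokenize]
    simp [dif_pos h, hcn, hwn, hvo, hla, hg, ih, pvTranslate]
  | case5 i result h char hcons hw v hvow hlast hgrp ih =>
    have hcn : consonantDict (PySem.Chars.lowerChar cs[i]) = none := hcons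
    have hwn : PySem.Chars.lowerChar cs[i] ≠ 'w' := hw
    have hvo : vowelDict (PySem.Chars.lowerChar cs[i]) = some v := hvow
    have hla : i ≠ cs.length - 1 := hlast
    have hg : groupVowelDict (PySem.Chars.lowerChar cs[i]) (cs[i + 1]?.getD ' ') = none := by
      simpa [List.getD_eq_getElem?_getD] using hgrp
    rw [pronounceGo, pvTokenize]
    simp [dif_pos h, hcn, hwn, hvo, hla, hg, ih, pvTranslate]
  | case6 i result h char hcons hw v hvow hlast ih =>
    have hcn : consonantDict (PySem.Chars.lowerChar cs[i]) = none := hcons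
    have hwn : PySem.Chars.lowerChar cs[i] ≠ 'w' := hw
    have hvo : vowelDict (PySem.Chars.lowerChar cs[i]) = some v := hvow
    rw [pronounceGo, pvTokenize]
    simp [dif_pos h, hcn, hwn, hvo, hlast, ih, pvTranslate]
  | case7 i result h char hcons hw hvow ih =>
    have hcn : consonantDict (PySem.Chars.lowerChar cs[i]) = none := hcons
    have hwn : PySem.Chars.lowerChar cs[i] ≠ 'w' := hw
    have hvo : vowelDict (PySem.Chars.lowerChar cs[i]) = none := hvow
    rw [pronounceGo, pvTokenize]
    simp [dif_pos h, hcn, hwn, hvo, ih, pvTranslate]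
  | case8 i result h =>
    rw [pronounceGo, pvTokenize]
    simp [dif_neg h]

-- ===== VERDICT (by name: the statement is the Claim_ definition above) =====
theorem pronounce_spec : Claim_equal_pronounce := by
  intro string _
  unfold Spec_pronounce pronounce pronounce_alt
  rw [pronounceGo_eq]
  simp
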